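-- pv_equiv track=rewrite | github.com/silmarp/musical-chainsaw | question_02/validator.py | valida_cdvpy
-- ===== SOURCE A (Python) =====
-- def valida_cdvpy(cdvpy):
--
--     if type(cdvpy) != str:    #type == str
--         return False
--     elif not(cdvpy.isdigit()):    #digits 0-9 only
--         return False
--     elif len(cdvpy) != 6:   #length == 6
--         return False
--     elif cdvpy[0] == "0":    #first digit != 0
--         return False
--
--
--     for i in range(5):
--         counter = 0
--         for j in range(5):
--             if cdvpy[i:i+2] == cdvpy[j:j+2]:
--                 counter+=1
--         if counter > 1:
--             return False
--
--
--     return True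
-- ===== SOURCE B (Python) =====
-- def valida_cdvpy(cdvpy):
--     if type(cdvpy) != str:
--         return False
--     if not cdvpy.isdigit():
--         return False
--     if len(cdvpy) != 6:
--         return False
--     if cdvpy[0] == "0":
--         return False
--     pairs = [cdvpy[i:i+2] for i in range(5)]
--     return len(set(pairs)) == len(pairs)
-- ===== Notes on version B (the rewrite author's own statement) =====
-- stated objective: idiomatic
-- what changed: The quadratic nested loop that counts, for each adjacent 2-char pair, how many of the 5 pairs equal it is replaced by building the list of 5 pairs once and comparing len(set(pairs)) with len(pairs); the four guard checks are unchanged.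
import Mathlib
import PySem

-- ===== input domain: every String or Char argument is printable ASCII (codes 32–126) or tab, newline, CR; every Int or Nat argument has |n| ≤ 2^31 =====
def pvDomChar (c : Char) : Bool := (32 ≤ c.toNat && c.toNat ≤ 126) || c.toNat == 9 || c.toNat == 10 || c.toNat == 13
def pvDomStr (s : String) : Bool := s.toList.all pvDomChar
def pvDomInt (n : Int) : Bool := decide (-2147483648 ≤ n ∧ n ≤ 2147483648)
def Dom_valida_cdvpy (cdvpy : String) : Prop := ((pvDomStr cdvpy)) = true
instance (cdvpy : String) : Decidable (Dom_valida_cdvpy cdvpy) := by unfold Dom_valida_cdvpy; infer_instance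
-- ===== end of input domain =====

-- B replaces A's quadratic nested counting scan over adjacent 2-char pairs with a single
-- set-based uniqueness check over the 5 pairs (objective: idiomatic; same guards, same result).

-- ===== PORT A =====
-- 'type(cdvpy) != str' is always false under the type convention (cdvpy : String), so that
-- guard is omitted; the remaining guards and the nested counting loops are transliterated.
def valida_cdvpy (cdvpy : String) : Bool :=
  let cs := cdvpy.toList
  if !(PySem.Chars.strIsdigit cs) then false
  else if cs.length ≠ 6 then false
  else if PySem.List.pyGetD cs 0 ' ' == '0' then false
  else
    -- for i in range(5): counter = …; if counter > 1: return False  (early return as a Bool accumulator)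
    (PySem.List.pyRange 0 5 1).foldl (fun (acc : Bool) i =>
      if acc then
        let counter : Nat := (PySem.List.pyRange 0 5 1).foldl (fun c j =>
          if PySem.List.slice cs (some i) (some (i+2)) = PySem.List.slice cs (some j) (some (j+2))
          then c + 1 else c) 0
        if counter > 1 then false else acc
      else false) true

-- ===== PORT B =====
def valida_cdvpy_alt (cdvpy : String) : Bool :=
  let cs := cdvpy.toList
  if !(PySem.Chars.strIsdigit cs) then false
  else if cs.length ≠ 6 then false
  else if PySem.List.pyGetD cs 0 ' ' == '0' then false
  else
    let pairs := (PySem.List.pyRange 0 5 1).map (fun i => PySem.List.slice cs (some i) (some (i+2)))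
    PySem.Set.len (PySem.Set.ofList pairs) == (pairs.length : Int)

-- ===== PRECONDITION & SPEC =====
def Spec_valida_cdvpy (cdvpy : String) (out : Bool) : Prop := out = valida_cdvpy_alt cdvpy
instance (cdvpy : String) (out : Bool) : Decidable (Spec_valida_cdvpy cdvpy out) := by unfold Spec_valida_cdvpy; infer_instance

-- ===== CLAIM (what is proved, stated in full; the proofs are below) =====
def Claim_equal_valida_cdvpy : Prop := ∀ (cdvpy : String), Dom_valida_cdvpy cdvpy → Spec_valida_cdvpy cdvpy (valida_cdvpy cdvpy)

-- ===== LEMMAS AND PROOFS =====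

-- A's nested counting scan over the five adjacent pairs finds a repeat iff B's dedup-based
-- cardinality check does: a finite case analysis over the ten pairwise equalities.
set_option maxHeartbeats 4000000 in
theorem pv_key (p : Int → List Char) :
    ([0,1,2,3,4] : List Int).foldl (fun (acc : Bool) i =>
      if acc then
        let counter : Nat := ([0,1,2,3,4] : List Int).foldl (fun c j =>
          if p i = p j then c + 1 else c) 0
        if counter > 1 then false else acc
      else false) true
    = (PySem.Set.len (PySem.Set.ofList (([0,1,2,3,4] : List Int).map p)) == ((([0,1,2,3,4] : List Int).map p).length : Int)) := by
  by_cases h01 : p 0 = p 1 <;> by_cases h02 : p 0 = p 2 <;> by_cases h03 : p 0 = p 3 <;>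
  by_cases h04 : p 0 = p 4 <;> by_cases h12 : p 1 = p 2 <;> by_cases h13 : p 1 = p 3 <;>
  by_cases h14 : p 1 = p 4 <;> by_cases h23 : p 2 = p 3 <;> by_cases h24 : p 2 = p 4 <;>
  by_cases h34 : p 3 = p 4 <;>
  simp_all [PySem.Set.ofList, PySem.Set.len, PySem.Set.add, PySem.Set.contains, List.foldl, eq_comm]

-- ===== VERDICT (by name: the statement is the Claim_ definition above) =====
set_option maxHeartbeats 4000000 in
theorem valida_cdvpy_spec : Claim_equal_valida_cdvpy := by
  intro cdvpy _
  unfold Spec_valida_cdvpy valida_cdvpy valida_cdvpy_alt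
  have hr : PySem.List.pyRange 0 5 1 = ([0,1,2,3,4] : List Int) := by decide
  rw [hr]
  dsimp only
  split_ifs <;> first
    | rfl
    | exact pv_key (fun i => PySem.List.slice cdvpy.toList (some i) (some (i+2)))
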